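-- pv_equiv track=rewrite | github.com/raokrutarth/Python_misc | notsohatchi.py | notsohatchi
-- ===== SOURCE A (Python) =====
-- def notsohatchi(n):
--     if n == 1:
--         return 1
--     if n == 2:
--         return 1
--     if n == 3:
--         return 1
--     else:
--         return notsohatchi(n-1) + notsohatchi(n-3)
-- ===== SOURCE B (Python) =====
-- def notsohatchi(n):
--     memo = {1: 1, 2: 1, 3: 1}
--
--     def f(k):
--         if k not in memo:
--             memo[k] = f(k - 1) + f(k - 3)
--         return memo[k]
--
--     return f(n)
-- ===== Notes on version B (the rewrite author's own statement) =====
-- stated objective: faster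
-- what changed: Replaces A's exponential double recursion with top-down dynamic programming: a memo dict seeded with the three base cases makes each value be computed once.
import Mathlib
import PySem

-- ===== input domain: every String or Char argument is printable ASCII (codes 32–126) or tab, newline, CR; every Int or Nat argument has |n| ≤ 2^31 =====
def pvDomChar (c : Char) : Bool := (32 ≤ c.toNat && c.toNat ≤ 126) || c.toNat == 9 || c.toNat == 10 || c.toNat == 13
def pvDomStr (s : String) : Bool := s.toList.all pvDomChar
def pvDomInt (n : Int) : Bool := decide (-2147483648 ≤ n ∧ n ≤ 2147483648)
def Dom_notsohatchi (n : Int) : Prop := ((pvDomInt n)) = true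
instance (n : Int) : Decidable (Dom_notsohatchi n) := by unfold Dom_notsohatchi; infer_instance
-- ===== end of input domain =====

-- B replaces A's exponential double recursion with top-down memoized recursion so each value is computed once (objective: faster).
-- ===== PORT A =====
-- A's recursion, with fuel making it total in Lean; fuel n.toNat suffices whenever n ≥ 1
-- (the recursion depth is at most n-1), and n ≤ 0 (where Python A never returns) is outside Pre_.
def notsohatchiFuel : Nat → Int → Int
  | 0, _ => 0
  | f + 1, n =>
    if n = 1 then 1
    else if n = 2 then 1
    else if n = 3 then 1
    else notsohatchiFuel f (n - 1) + notsohatchiFuel f (n - 3)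

def notsohatchi (n : Int) : Int := notsohatchiFuel n.toNat n

-- ===== PORT B =====
-- f(k) of Source B: 'if k not in memo: memo[k] = f(k-1) + f(k-3); return memo[k]', the memo dict
-- threaded through; fuel makes it total in Lean (fuel n.toNat suffices whenever 1 ≤ n, since the
-- recursion depth is at most n - 3; like A, the Python B recurses forever for n ≤ 0 — outside Pre_).
def altMemo : Nat → Int → PySem.Dict Int Int → Int × PySem.Dict Int Int
  | 0, _, m => (0, m)
  | fu + 1, k, m =>
    if m.contains k then (m.getD k 0, m)
    else
      let p1 := altMemo fu (k - 1) m
      let p3 := altMemo fu (k - 3) p1.2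
      let m2 := p3.2.insert k (p1.1 + p3.1)
      (m2.getD k 0, m2)

-- memo = {1: 1, 2: 1, 3: 1}
def altMemo0 : PySem.Dict Int Int := PySem.Dict.ofList [(1, 1), (2, 1), (3, 1)]

def notsohatchi_alt (n : Int) : Int := (altMemo n.toNat n altMemo0).1

-- ===== PRECONDITION & SPEC =====
-- For n ≤ 0 the Python A (and likewise B) recurses without reaching a base case and raises RecursionError.
def Pre_notsohatchi (n : Int) : Prop := 1 ≤ n
instance (n : Int) : Decidable (Pre_notsohatchi n) := by unfold Pre_notsohatchi; infer_instance
def pvWitness_notsohatchi : Int := (5)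

def Spec_notsohatchi (n : Int) (out : Int) : Prop := out = notsohatchi_alt n
instance (n : Int) (out : Int) : Decidable (Spec_notsohatchi n out) := by unfold Spec_notsohatchi; infer_instance

-- ===== CLAIM =====
def Claim_equal_notsohatchi : Prop := ∀ (n : Int), Dom_notsohatchi n → Pre_notsohatchi n → Spec_notsohatchi n (notsohatchi n)

-- ===== LEMMAS AND PROOFS =====

-- the sequence both programs compute, indexed from 0: g 0 = g 1 = g 2 = 1, g (k+3) = g (k+2) + g k
def g : Nat → Int
  | 0 => 1
  | 1 => 1
  | 2 => 1
  | k + 3 => g (k + 2) + g k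

def MemoInv (m : PySem.Dict Int Int) : Prop :=
  (∀ (j : Int) (v : Int), m.get? j = some v → 1 ≤ j ∧ v = g (j.toNat - 1)) ∧
    m.get? 1 = some 1 ∧ m.get? 2 = some 1 ∧ m.get? 3 = some 1

lemma memoInv0 : MemoInv altMemo0 := by
  refine ⟨?_, by decide, by decide, by decide⟩
  intro j v h
  simp only [show altMemo0 = PySem.Dict.mk [(1, 1), (2, 1), (3, 1)] from by decide,
    PySem.Dict.get?_mk_cons, beq_iff_eq] at h
  split_ifs at h with h1 h2 h3
  · subst h1; exact ⟨le_refl 1, by simpa [g] using h.symm⟩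
  · subst h2; exact ⟨by omega, by simpa [g] using h.symm⟩
  · subst h3; exact ⟨by omega, by simpa [g] using h.symm⟩
  · simp [PySem.Dict.get?] at h

lemma altMemo_spec : ∀ (fu : Nat) (k : Int) (m : PySem.Dict Int Int), MemoInv m → 1 ≤ k →
    k.toNat ≤ fu → (altMemo fu k m).1 = g (k.toNat - 1) ∧ MemoInv (altMemo fu k m).2 := by
  intro fu
  induction fu with
  | zero => intro k m _ h1 h2; omega
  | succ fu ih =>
    intro k m hm h1 h2
    by_cases hc : m.contains k = true
    · obtain ⟨v, hv⟩ := Option.isSome_iff_exists.mp (PySem.Dict.contains_eq_isSome_get? m k ▸ hc)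
      have hv2 := (hm.1 k v hv).2
      refine ⟨?_, by simpa [altMemo, hc] using hm⟩
      simp [altMemo, hc, PySem.Dict.getD_of_get?_eq_some m 0 hv, hv2]
    · have hget : m.get? k = none := by
        cases h : m.get? k with
        | none => rfl
        | some v => exact absurd (by rw [PySem.Dict.contains_eq_isSome_get?, h]; rfl) hc
      have hk4 : 4 ≤ k := by
        rcases hm with ⟨_, e1, e2, e3⟩
        by_contra h4
        interval_cases k <;> simp_all
      have r1 := ih (k - 1) m hm (by omega) (by omega)
      have r3 := ih (k - 3) (altMemo fu (k - 1) m).2 r1.2 (by omega) (by omega)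
      have hsum : (altMemo fu (k - 1) m).1 + (altMemo fu (k - 3) (altMemo fu (k - 1) m).2).1
          = g (k.toNat - 1) := by
        rw [r1.1, r3.1]
        have hrec : g ((k.toNat - 4) + 3) = g ((k.toNat - 4) + 2) + g (k.toNat - 4) := by
          simp [g]
        rw [show (k.toNat - 4) + 3 = k.toNat - 1 by omega,
            show (k.toNat - 4) + 2 = (k - 1).toNat - 1 by omega,
            show k.toNat - 4 = (k - 3).toNat - 1 by omega] at hrec
        omega
      have hres : altMemo (fu + 1) k m =
          (((altMemo fu (k - 3) (altMemo fu (k - 1) m).2).2.insert k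
              ((altMemo fu (k - 1) m).1 + (altMemo fu (k - 3) (altMemo fu (k - 1) m).2).1)).getD k 0,
            (altMemo fu (k - 3) (altMemo fu (k - 1) m).2).2.insert k
              ((altMemo fu (k - 1) m).1 + (altMemo fu (k - 3) (altMemo fu (k - 1) m).2).1)) := by
        simp [altMemo, hc]
      rw [hres]
      constructor
      · rw [PySem.Dict.getD_insert_self, hsum]
      · rcases r3.2 with ⟨hall, e1, e2, e3⟩
        refine ⟨?_, ?_, ?_, ?_⟩
        · intro j v hj
          rw [PySem.Dict.get?_insert] at hj
          split_ifs at hj with hjk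
          · subst hjk
            exact ⟨by omega, by simpa [hsum] using (Option.some_inj.mp hj).symm⟩
          · exact hall j v hj
        · rw [PySem.Dict.get?_insert, if_neg (by omega)]; exact e1
        · rw [PySem.Dict.get?_insert, if_neg (by omega)]; exact e2
        · rw [PySem.Dict.get?_insert, if_neg (by omega)]; exact e3

lemma alt_eq_g (n : Int) (hn : 1 ≤ n) : notsohatchi_alt n = g (n.toNat - 1) :=
  (altMemo_spec n.toNat n altMemo0 memoInv0 hn le_rfl).1

lemma fuel_eq_g : ∀ (f : Nat) (n : Int), 1 ≤ n → n.toNat ≤ f →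
    notsohatchiFuel f n = g (n.toNat - 1) := by
  intro f
  induction f with
  | zero => intro n h1 h2; omega
  | succ f ih =>
    intro n h1 h2
    by_cases e1 : n = 1
    · subst e1; simp [notsohatchiFuel, g]
    by_cases e2 : n = 2
    · subst e2; simp [notsohatchiFuel, g]
    by_cases e3 : n = 3
    · subst e3; simp [notsohatchiFuel, g]
    have h4 : 4 ≤ n := by omega
    have r1 := ih (n - 1) (by omega) (by omega)
    have r3 := ih (n - 3) (by omega) (by omega)
    have hrec : g ((n.toNat - 4) + 3) = g ((n.toNat - 4) + 2) + g (n.toNat - 4) := by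
      simp [g]
    rw [show (n.toNat - 4) + 3 = n.toNat - 1 by omega,
        show (n.toNat - 4) + 2 = (n - 1).toNat - 1 by omega,
        show n.toNat - 4 = (n - 3).toNat - 1 by omega] at hrec
    simp only [notsohatchiFuel, e1, e2, e3, if_false, r1, r3, hrec]

-- ===== VERDICT =====
theorem notsohatchi_spec : Claim_equal_notsohatchi := by
  intro n _ hpre
  unfold Spec_notsohatchi notsohatchi
  rw [fuel_eq_g n.toNat n hpre le_rfl, alt_eq_g n hpre]
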